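-- pv_equiv track=rewrite | github.com/giridharid/streamlit | streamlit_secrets_chatbot_POC.py | match_synonyms
-- ===== SOURCE A (Python) =====
-- def match_synonyms(query, synonyms_dict):
--     matched_aspects = set()
--     query_lower = query.lower()
--     for aspect, synonyms in synonyms_dict.items():
--         for synonym in synonyms:
--             if synonym in query_lower:
--                 matched_aspects.add(aspect)
--                 break
--     return matched_aspects
-- ===== SOURCE B (Python) =====
-- def match_synonyms(query, synonyms_dict):
--     # Length-grouped window index: for each distinct synonym length L, hash all
--     # length-L windows of the lowered query once; each synonym is then a set lookup.
--     q = query.lower()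
--     n = len(q)
--     lengths = {len(s) for syns in synonyms_dict.values() for s in syns if len(s) <= n}
--     windows = {}
--     for L in lengths:
--         windows[L] = {q[i:i + L] for i in range(n - L + 1)}
--     matched = set()
--     for aspect, syns in synonyms_dict.items():
--         for s in syns:
--             if len(s) <= n and s in windows[len(s)]:
--                 matched.add(aspect)
--                 break
--     return matched
-- ===== Notes on version B (the rewrite author's own statement) =====
-- stated objective: faster
-- what changed: B replaces A's per-synonym substring scan of the query by a hash index built once per distinct synonym length (all query windows of that length in a set), so each synonym test becomes a single set lookup.
import Mathlib
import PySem

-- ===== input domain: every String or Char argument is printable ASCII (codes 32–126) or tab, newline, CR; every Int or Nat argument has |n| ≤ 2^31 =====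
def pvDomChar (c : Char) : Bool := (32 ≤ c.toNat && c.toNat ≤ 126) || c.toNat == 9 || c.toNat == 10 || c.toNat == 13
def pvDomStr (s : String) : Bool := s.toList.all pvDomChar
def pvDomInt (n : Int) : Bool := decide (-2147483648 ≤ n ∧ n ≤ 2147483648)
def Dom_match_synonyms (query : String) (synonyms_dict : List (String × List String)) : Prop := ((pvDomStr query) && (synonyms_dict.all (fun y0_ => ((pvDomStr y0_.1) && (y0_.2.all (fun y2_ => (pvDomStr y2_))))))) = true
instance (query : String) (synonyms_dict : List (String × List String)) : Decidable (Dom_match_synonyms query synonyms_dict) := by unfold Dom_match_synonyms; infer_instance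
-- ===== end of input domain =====

-- B replaces A's per-synonym substring scans by a per-length hash index of the query's
-- windows built once, so each synonym becomes a single set lookup (objective: faster).

-- ===== PORT A =====
-- inner loop: 'for synonym in synonyms: if synonym in query_lower: add; break'
def msA_inner (query_lower : List Char) (acc : PySem.Set String) (aspect : String) : List String → PySem.Set String
  | [] => acc
  | synonym :: rest =>
    if PySem.Chars.isIn synonym.toList query_lower then PySem.Set.add acc aspect
    else msA_inner query_lower acc aspect rest

def match_synonyms (query : String) (synonyms_dict : List (String × List String)) : List String :=
  let query_lower := PySem.Chars.lower query.toList
  synonyms_dict.foldl (fun matched_aspects p => msA_inner query_lower matched_aspects p.1 p.2) []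

-- ===== PORT B =====
-- {q[i:i+L] for i in range(n - L + 1)}
def msB_windows (q : List Char) (L : Int) : PySem.Set (List Char) :=
  PySem.Set.ofList ((PySem.List.pyRange 0 ((q.length : Int) - L + 1)).map
    (fun i => PySem.List.slice q (some i) (some (i + L))))

-- inner loop: 'for s in syns: if len(s) <= n and s in windows[len(s)]: add; break'
def msB_inner (n : Int) (windows : PySem.Dict Int (PySem.Set (List Char)))
    (acc : PySem.Set String) (aspect : String) : List String → PySem.Set String
  | [] => acc
  | s :: rest =>
    if PySem.Str.len s ≤ n ∧ PySem.Set.contains (windows.getD (PySem.Str.len s) []) s.toList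
    then PySem.Set.add acc aspect
    else msB_inner n windows acc aspect rest

def match_synonyms_alt (query : String) (synonyms_dict : List (String × List String)) : List String :=
  let q := PySem.Chars.lower query.toList
  let n : Int := (q.length : Int)
  let lengths : PySem.Set Int :=
    PySem.Set.ofList (((synonyms_dict.flatMap (fun p => p.2)).filter
      (fun s => decide (PySem.Str.len s ≤ n))).map PySem.Str.len)
  let windows : PySem.Dict Int (PySem.Set (List Char)) :=
    lengths.foldl (fun w L => w.insert L (msB_windows q L)) PySem.Dict.empty
  synonyms_dict.foldl (fun matched p => msB_inner n windows matched p.1 p.2) []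

-- ===== PRECONDITION & SPEC =====
def Spec_match_synonyms (query : String) (synonyms_dict : List (String × List String)) (out : List String) : Prop := out = match_synonyms_alt query synonyms_dict
instance (query : String) (synonyms_dict : List (String × List String)) (out : List String) : Decidable (Spec_match_synonyms query synonyms_dict out) := by unfold Spec_match_synonyms; infer_instance

-- ===== CLAIM (what is proved, stated in full; the proofs are below) =====
def Claim_equal_match_synonyms : Prop := ∀ (query : String) (synonyms_dict : List (String × List String)), Dom_match_synonyms query synonyms_dict → Spec_match_synonyms query synonyms_dict (match_synonyms query synonyms_dict)

-- ===== LEMMAS AND PROOFS =====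

-- B's window dictionary, named for the proofs (definitionally the one in match_synonyms_alt)
def msWindows (q : List Char) (synonyms_dict : List (String × List String)) : PySem.Dict Int (PySem.Set (List Char)) :=
  (PySem.Set.ofList (((synonyms_dict.flatMap (fun p => p.2)).filter
      (fun s => decide (PySem.Str.len s ≤ (q.length : Int)))).map PySem.Str.len)).foldl
    (fun w L => w.insert L (msB_windows q L)) PySem.Dict.empty

lemma msAlt_eq (query : String) (d : List (String × List String)) :
    match_synonyms_alt query d =
      d.foldl (fun matched p =>
        msB_inner ((PySem.Chars.lower query.toList).length : Int)
          (msWindows (PySem.Chars.lower query.toList) d) matched p.1 p.2) [] := rfl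

lemma infix_iff_drop_take {α} (l t : List α) :
    l <:+: t ↔ ∃ k, k + l.length ≤ t.length ∧ (t.drop k).take l.length = l := by
  constructor
  · rintro ⟨pre, post, rfl⟩
    exact ⟨pre.length, by simp, by simp⟩
  · rintro ⟨k, hk, h⟩
    exact h ▸ ((t.drop k).take_prefix _).isInfix.trans (t.drop_suffix k).isInfix

lemma get?_foldl_insert_not_mem {ν : Type} (f : Int → ν) (ks : List Int)
    (w : PySem.Dict Int ν) (L : Int) (hL : L ∉ ks) :
    (ks.foldl (fun w k => w.insert k (f k)) w).get? L = w.get? L := by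
  induction ks generalizing w with
  | nil => rfl
  | cons k ks ih =>
    simp only [List.mem_cons, not_or] at hL
    rw [List.foldl_cons, ih _ hL.2, PySem.Dict.get?_insert_of_ne _ _ hL.1]

lemma get?_foldl_insert_mem {ν : Type} (f : Int → ν) (ks : List Int)
    (w : PySem.Dict Int ν) (L : Int) (hnd : ks.Nodup) (hL : L ∈ ks) :
    (ks.foldl (fun w k => w.insert k (f k)) w).get? L = some (f L) := by
  induction ks generalizing w with
  | nil => cases hL
  | cons k ks ih =>
    rcases List.mem_cons.mp hL with rfl | hL'
    · rw [List.foldl_cons, get?_foldl_insert_not_mem _ _ _ _ (List.nodup_cons.mp hnd).1,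
        PySem.Dict.get?_insert_self]
    · rw [List.foldl_cons]
      exact ih _ (List.nodup_cons.mp hnd).2 hL'

lemma mem_windows (q s : List Char) (_hs : s.length ≤ q.length) :
    PySem.Set.contains (msB_windows q ((s.length : Int))) s = true ↔ s <:+: q := by
  rw [PySem.Set.contains_iff, msB_windows, PySem.Set.mem_ofList, List.mem_map,
    infix_iff_drop_take]
  constructor
  · rintro ⟨i, hi, hsl⟩
    rw [PySem.List.mem_pyRange_one] at hi
    obtain ⟨k, rfl⟩ := Int.eq_ofNat_of_zero_le hi.1
    refine ⟨k, by omega, ?_⟩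
    have : ((k : Int) + (s.length : Int)) = ((k + s.length : Nat) : Int) := by push_cast; ring
    rw [this, PySem.List.slice_natCast] at hsl
    simpa using hsl
  · rintro ⟨k, hk, hsl⟩
    refine ⟨(k : Int), PySem.List.mem_pyRange_one.mpr ⟨by positivity, by omega⟩, ?_⟩
    have : ((k : Int) + (s.length : Int)) = ((k + s.length : Nat) : Int) := by push_cast; ring
    rw [this, PySem.List.slice_natCast]
    simpa using hsl

lemma cond_eq (query : String) (d : List (String × List String)) (s : String)
    (hs : s ∈ d.flatMap (fun p => p.2)) :
    PySem.Chars.isIn s.toList (PySem.Chars.lower query.toList)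
      = decide (PySem.Str.len s ≤ ((PySem.Chars.lower query.toList).length : Int) ∧
          PySem.Set.contains
            ((msWindows (PySem.Chars.lower query.toList) d).getD (PySem.Str.len s) [])
            s.toList = true) := by
  set q := PySem.Chars.lower query.toList with hq
  by_cases hlen : s.toList.length ≤ q.length
  · have hmem : PySem.Str.len s ∈
        PySem.Set.ofList (((d.flatMap (fun p => p.2)).filter
          (fun t => decide (PySem.Str.len t ≤ (q.length : Int)))).map PySem.Str.len) := by
      rw [PySem.Set.mem_ofList]
      exact List.mem_map.mpr ⟨s, List.mem_filter.mpr ⟨hs, by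
        simp [PySem.Str.len_eq]; exact_mod_cast hlen⟩, rfl⟩
    have hget : (msWindows q d).get? (PySem.Str.len s) = some (msB_windows q (PySem.Str.len s)) :=
      get?_foldl_insert_mem _ _ _ _ (PySem.Set.nodup_ofList _) hmem
    have hgetD : (msWindows q d).getD (PySem.Str.len s) [] = msB_windows q (PySem.Str.len s) := by
      simp only [PySem.Dict.getD, hget, Option.getD_some]
    rw [hgetD]
    by_cases hin : s.toList <:+: q
    · rw [(PySem.Chars.isIn_iff_infix _ _).mpr hin, eq_comm, decide_eq_true_eq]
      refine ⟨by rw [PySem.Str.len_eq]; exact_mod_cast hlen, ?_⟩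
      rw [PySem.Str.len_eq]
      exact (mem_windows q s.toList hlen).mpr hin
    · have h0 : PySem.Chars.isIn s.toList q = false := by
        rw [Bool.eq_false_iff]
        exact fun h => hin ((PySem.Chars.isIn_iff_infix _ _).mp h)
      rw [h0, eq_comm, decide_eq_false_iff_not]
      rintro ⟨_, hcontains⟩
      rw [PySem.Str.len_eq] at hcontains
      exact hin ((mem_windows q s.toList hlen).mp hcontains)
  · have h1 : PySem.Chars.isIn s.toList q = false := by
      rw [Bool.eq_false_iff]
      intro h
      exact hlen ((PySem.Chars.isIn_iff_infix _ _).mp h).length_le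
    rw [h1, eq_comm, decide_eq_false_iff_not]
    rintro ⟨h2, _⟩
    rw [PySem.Str.len_eq] at h2
    exact hlen (by exact_mod_cast h2)

lemma inner_eq (query : String) (d : List (String × List String)) (aspect : String)
    (syns : List String) (acc : PySem.Set String)
    (hsub : ∀ s ∈ syns, s ∈ d.flatMap (fun p => p.2)) :
    msA_inner (PySem.Chars.lower query.toList) acc aspect syns
      = msB_inner ((PySem.Chars.lower query.toList).length : Int)
          (msWindows (PySem.Chars.lower query.toList) d) acc aspect syns := by
  induction syns with
  | nil => rfl
  | cons s rest ih =>
    rw [msA_inner, msB_inner, cond_eq query d s (hsub s (List.mem_cons_self))]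
    by_cases hc : PySem.Str.len s ≤ ((PySem.Chars.lower query.toList).length : Int) ∧
        PySem.Set.contains
          ((msWindows (PySem.Chars.lower query.toList) d).getD (PySem.Str.len s) [])
          s.toList = true
    · rw [if_pos hc, if_pos (decide_eq_true hc)]
    · rw [if_neg hc, if_neg (by rw [decide_eq_true_eq]; exact hc),
        ih (fun t ht => hsub t (List.mem_cons_of_mem _ ht))]

-- ===== VERDICT (by name: the statement is the Claim_ definition above) =====
theorem match_synonyms_spec : Claim_equal_match_synonyms := by
  intro query d _
  unfold Spec_match_synonyms
  rw [msAlt_eq, match_synonyms]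
  exact PySem.List.foldl_congr_mem _ _ _ _ (fun acc p hp =>
    inner_eq query d p.1 p.2 acc (fun s hs => List.mem_flatMap.mpr ⟨p, hp, hs⟩))
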